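-- pv_equiv track=rewrite | github.com/anyoonbin/Algorithm | 프로그래머스/뉴스 클러스터링.py | solution
-- ===== SOURCE A (Python) =====
-- from collections import Counter
--
-- def solution(str1, str2):
--     union=[]
--     inter=[]
--
--     s1=list(filter(lambda x: x.isalpha() and len(x)==2, [str1[i:i+2].lower() for i in range(len(str1)-1)]))
--     s2=list(filter(lambda x: x.isalpha() and len(x)==2, [str2[i:i+2].lower() for i in range(len(str2)-1)]))
--     c1,c2=Counter(s1),Counter(s2)
--
--     for i in c1+c2:
--         for j in range(max(c1[i],c2[i])):
--             union.append(i)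
--         for j in range(min(c1[i],c2[i])):
--             inter.append(i)
--
--     return int(len(inter)/len(union)*65536) if inter or union else 65536
-- ===== SOURCE B (Python) =====
-- def solution(str1, str2):
--     s1 = [b for b in (str1[i:i+2].lower() for i in range(len(str1) - 1))
--           if b.isalpha() and len(b) == 2]
--     s2 = [b for b in (str2[i:i+2].lower() for i in range(len(str2) - 1))
--           if b.isalpha() and len(b) == 2]
--     # greedy multiset matching: consume s2 one occurrence at a time, no Counter
--     rest = list(s2)
--     inter = 0
--     for x in s1:
--         if x in rest:
--             rest.remove(x)
--             inter += 1
--     union = len(s1) + len(s2) - inter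
--     return int(inter / union * 65536) if union else 65536
-- ===== Notes on version B (the rewrite author's own statement) =====
-- stated objective: alternative
-- what changed: B drops Counters entirely: it computes the intersection size by greedy multiset matching (for each bigram of s1, remove its first occurrence from a mutable copy of s2 and count the matches) and derives the union size by the identity union = len(s1)+len(s2)-inter, instead of A's Counter addition plus the double loop that materialises union/inter lists.
import Mathlib
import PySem

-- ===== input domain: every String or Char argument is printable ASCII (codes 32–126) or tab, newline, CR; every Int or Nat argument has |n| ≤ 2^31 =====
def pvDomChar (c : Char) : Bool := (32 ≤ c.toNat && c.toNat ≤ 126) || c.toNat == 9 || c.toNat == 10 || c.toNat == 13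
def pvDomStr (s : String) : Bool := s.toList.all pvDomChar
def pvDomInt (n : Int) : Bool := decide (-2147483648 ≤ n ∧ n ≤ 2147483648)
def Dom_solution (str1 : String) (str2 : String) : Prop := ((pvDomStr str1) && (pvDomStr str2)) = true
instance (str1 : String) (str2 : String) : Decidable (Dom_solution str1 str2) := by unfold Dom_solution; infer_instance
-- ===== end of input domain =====

-- B replaces A's Counter arithmetic and union/inter list-building by greedy multiset matching:
-- each bigram of s1 consumes its first remaining occurrence in a copy of s2 (no Counter),
-- and the union size is the closed form |s1|+|s2|-inter (alternative decomposition, not faster).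


-- ===== PORT A =====
-- shared helper: the filtered lower-cased bigram list (identical code in Source A and Source B);
-- a Python 2-char string is represented as a List Char
def pvBigrams (s : List Char) : List (List Char) :=
  (((PySem.List.pyRange 0 ((s.length : Int) - 1) 1).map
      (fun i => PySem.Chars.lower (PySem.List.slice s (some i) (some (i + 2))))).filter
    (fun x => PySem.Chars.strIsalpha x && (x.length == 2)))

-- int(len(inter)/len(union)*65536) is ported as exact integer floor division; this matches
-- CPython's double arithmetic whenever len(union) < 2^37 (65536 = 2^16 scales exactly)
def solution (str1 : String) (str2 : String) : Int :=
  let s1 := pvBigrams str1.toList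
  let s2 := pvBigrams str2.toList
  let c1 := PySem.Dict.counter s1
  let c2 := PySem.Dict.counter s2
  -- c1 + c2 (Counter addition): fold c2's items into c1 adding counts; all counts are
  -- positive here, so Counter.__add__'s positivity filter never drops a key
  let c12 := c2.items.foldl (fun d kv => d.insert kv.1 (d.getD kv.1 0 + kv.2)) c1
  let pair := c12.keys.foldl
      (fun (acc : List (List Char) × List (List Char)) k =>
        ((PySem.List.pyRange 0 (max (c1.getD k 0) (c2.getD k 0)) 1).foldl (fun a _ => a ++ [k]) acc.1,
         (PySem.List.pyRange 0 (min (c1.getD k 0) (c2.getD k 0)) 1).foldl (fun a _ => a ++ [k]) acc.2))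
      ([], [])
  if pair.2 ≠ [] ∨ pair.1 ≠ [] then
    PySem.Int.floordiv ((pair.2.length : Int) * 65536) (pair.1.length : Int)
  else 65536

-- ===== PORT B =====
-- 'x in rest' is List.contains, 'rest.remove(x)' removes the first occurrence = List.erase
def solution_alt (str1 : String) (str2 : String) : Int :=
  let s1 := pvBigrams str1.toList
  let s2 := pvBigrams str2.toList
  let p := s1.foldl
      (fun (st : Int × List (List Char)) x =>
        if st.2.contains x then (st.1 + 1, st.2.erase x) else st) (0, s2)
  let inter := p.1
  let union := (s1.length : Int) + (s2.length : Int) - inter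
  if union ≠ 0 then PySem.Int.floordiv (inter * 65536) union else 65536

-- ===== PRECONDITION & SPEC =====
def Spec_solution (str1 : String) (str2 : String) (out : Int) : Prop := out = solution_alt str1 str2
instance (str1 : String) (str2 : String) (out : Int) : Decidable (Spec_solution str1 str2 out) := by unfold Spec_solution; infer_instance

-- ===== CLAIM (what is proved, stated in full; the proofs are below) =====
def Claim_equal_solution : Prop := ∀ (str1 : String) (str2 : String), Dom_solution str1 str2 → Spec_solution str1 str2 (solution str1 str2)

-- ===== LEMMAS AND PROOFS =====

-- proof-side name for B's greedy matching loop
def pvInterB (s1 s2 : List (List Char)) : Int :=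
  (s1.foldl (fun (st : Int × List (List Char)) x =>
      if st.2.contains x then (st.1 + 1, st.2.erase x) else st) (0, s2)).1

-- the multiset intersection list B's loop implicitly traverses (BEq version of List.bagInter)
def pvBagInter : List (List Char) → List (List Char) → List (List Char)
  | [], _ => []
  | x :: t, r => if r.contains x then x :: pvBagInter t (r.erase x) else pvBagInter t r

lemma pv_loop_eq_bagInter (s1 : List (List Char)) :
    ∀ (r : List (List Char)) (acc : Int),
    (s1.foldl (fun (st : Int × List (List Char)) x =>
        if st.2.contains x then (st.1 + 1, st.2.erase x) else st) (acc, r)).1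
      = acc + ((pvBagInter s1 r).length : Int) := by
  induction s1 with
  | nil => intro r acc; simp [pvBagInter]
  | cons x t ih =>
      intro r acc
      by_cases h : r.contains x = true
      · simp only [List.foldl_cons, if_pos h, pvBagInter, ih]
        simp; omega
      · simp only [List.foldl_cons, if_neg h, pvBagInter, ih]

lemma pv_bagInter_subset (s1 : List (List Char)) :
    ∀ (r x : _), x ∈ pvBagInter s1 r → x ∈ s1 := by
  induction s1 with
  | nil => intro r x h; simp [pvBagInter] at h
  | cons a t ih =>
      intro r x h
      by_cases hc : r.contains a = true
      · rw [pvBagInter, if_pos hc, List.mem_cons] at h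
        rcases h with h | h
        · exact h ▸ List.mem_cons_self
        · exact List.mem_cons_of_mem _ (ih _ _ h)
      · rw [pvBagInter, if_neg hc] at h
        exact List.mem_cons_of_mem _ (ih _ _ h)

lemma pv_count_bagInter (a : List Char) (s1 : List (List Char)) :
    ∀ (r : List (List Char)),
    (pvBagInter s1 r).count a = min (s1.count a) (r.count a) := by
  induction s1 with
  | nil => intro r; simp [pvBagInter]
  | cons x t ih =>
      intro r
      by_cases h : r.contains x = true
      · have hxr : x ∈ r := by simpa using h
        have hpos : 0 < r.count x := List.count_pos_iff.2 hxr
        rw [pvBagInter, if_pos h, List.count_cons, List.count_cons, ih]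
        by_cases hax : x = a
        · subst hax
          rw [List.count_erase_self]
          simp; omega
        · have hne : ¬ (x == a) = true := by simpa using hax
          rw [List.count_erase_of_ne (fun e => hax e.symm)]
          simp [hne]
      · have hxr : x ∉ r := by simpa using h
        have h0 : r.count x = 0 := List.count_eq_zero.2 hxr
        rw [pvBagInter, if_neg h, List.count_cons, ih]
        by_cases hax : x = a
        · subst hax; simp; omega
        · have hne : ¬ (x == a) = true := by simpa using hax
          simp [hne]

-- keys of a dict after a fold of inserts: Set.update of the old keys
lemma pv_keys_insert_add (d : PySem.Dict (List Char) Int) (k : List Char) (v : Int) :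
    (d.insert k v).keys = PySem.Set.add d.keys k := by
  by_cases h : d.contains k = true
  · rw [PySem.Dict.keys_insert_of_contains d v h]
    simp [PySem.Set.add, PySem.Set.contains, (PySem.Dict.contains_iff_mem_keys d k).1 h]
  · rw [PySem.Dict.keys_insert_of_not_contains d v (by simpa using h)]
    have : ¬ k ∈ d.keys := fun hm => h ((PySem.Dict.contains_iff_mem_keys d k).2 hm)
    simp [PySem.Set.add, PySem.Set.contains, this]

lemma pv_keys_foldl_insert (l : List (List Char × Int)) :
    ∀ (d : PySem.Dict (List Char) Int),
    (l.foldl (fun d kv => d.insert kv.1 (d.getD kv.1 0 + kv.2)) d).keys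
      = PySem.Set.update d.keys (l.map Prod.fst) := by
  induction l with
  | nil => intro d; simp [PySem.Set.update_nil]
  | cons kv t ih =>
      intro d
      simp only [List.foldl_cons, List.map_cons, PySem.Set.update_cons]
      rw [ih, pv_keys_insert_add]

lemma pv_nodup_keys_foldl_insert (l : List (List Char × Int)) :
    ∀ (d : PySem.Dict (List Char) Int), d.keys.Nodup →
    (l.foldl (fun d kv => d.insert kv.1 (d.getD kv.1 0 + kv.2)) d).keys.Nodup := by
  induction l with
  | nil => intro d h; simpa using h
  | cons kv t ih => intro d h; exact ih _ (PySem.Dict.nodup_keys_insert d _ _ h)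

lemma pv_sum_toNat_int (f : List Char → Int) (ks : List (List Char)) (h : ∀ k ∈ ks, 0 ≤ f k) :
    (((ks.map (fun k => (f k).toNat)).sum : Nat) : Int) = (ks.map f).sum := by
  induction ks with
  | nil => simp
  | cons k t ih =>
      simp only [List.map_cons, List.sum_cons, Nat.cast_add]
      rw [Int.toNat_of_nonneg (h k (by simp)), ih (fun x hx => h x (by simp [hx]))]

-- Σ over a nodup list K ⊇ elements of s of the multiplicities of s is |s|
lemma pv_sum_count_eq (s K : List (List Char)) (hn : K.Nodup) (hs : ∀ x ∈ s, x ∈ K) :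
    (K.map (fun k => (s.count k : Int))).sum = (s.length : Int) := by
  induction s with
  | nil => simp [List.sum_eq_zero]
  | cons x t ih =>
      have hx : x ∈ K := hs x (List.mem_cons_self)
      have h1 : (K.map (fun k => ((x :: t).count k : Int))).sum
          = (K.map (fun k => (t.count k : Int) + (if k == x then (1:Int) else 0))).sum := by
        refine congrArg List.sum (List.map_congr_left (fun k _ => ?_))
        rw [List.count_cons]
        split_ifs <;> simp_all
      rw [h1, PySem.List.sum_map_add_int, ih (fun y hy => hs y (List.mem_cons_of_mem x hy)),
          PySem.List.sum_map_ite_one_zero (fun k => k == x) K]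
      have : List.countP (fun k => k == x) K = List.count x K := rfl
      rw [this, List.count_eq_one_of_mem hn hx]
      simp

-- the bagInter length is the min-sum over any nodup cover K of s1 ∪ s2
lemma pv_bagInter_length (s1 s2 K : List (List Char)) (hn : K.Nodup)
    (hm : ∀ x, x ∈ K ↔ x ∈ s1 ∨ x ∈ s2) :
    (((pvBagInter s1 s2).length : Nat) : Int)
      = (K.map (fun k => min (s1.count k : Int) (s2.count k))).sum := by
  have hsub : ∀ x ∈ pvBagInter s1 s2, x ∈ K := by
    intro x hx
    exact (hm x).2 (Or.inl (pv_bagInter_subset s1 s2 x hx))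
  have hlen : (K.map (fun k => ((pvBagInter s1 s2).count k : Int))).sum
      = ((pvBagInter s1 s2).length : Int) := pv_sum_count_eq _ K hn hsub
  rw [← hlen]
  refine congrArg List.sum (List.map_congr_left (fun k _ => ?_))
  rw [pv_count_bagInter]
  simp [Nat.cast_min]

lemma pv_sum_map_sub (f g : List Char → Int) (K : List (List Char)) :
    (K.map (fun k => f k - g k)).sum = (K.map f).sum - (K.map g).sum := by
  induction K with
  | nil => simp
  | cons k t ih => simp only [List.map_cons, List.sum_cons]; rw [ih]; ring

-- max-sum = |s1| + |s2| - min-sum over a nodup cover of s1 ∪ s2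
lemma pv_sum_max_eq (s1 s2 K : List (List Char)) (hn : K.Nodup)
    (hm : ∀ x, x ∈ K ↔ x ∈ s1 ∨ x ∈ s2) :
    (K.map (fun k => max (s1.count k : Int) (s2.count k))).sum
      = (s1.length : Int) + (s2.length : Int)
        - (K.map (fun k => min (s1.count k : Int) (s2.count k))).sum := by
  have h1 : (K.map (fun k => max (s1.count k : Int) (s2.count k))).sum
      = (K.map (fun k => ((s1.count k : Int) + (s2.count k : Int))
          - min (s1.count k : Int) (s2.count k))).sum := by
    refine congrArg List.sum (List.map_congr_left (fun k _ => ?_))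
    omega
  rw [h1, pv_sum_map_sub, PySem.List.sum_map_add_int,
      pv_sum_count_eq s1 K hn (fun x hx => (hm x).2 (Or.inl hx)),
      pv_sum_count_eq s2 K hn (fun x hx => (hm x).2 (Or.inr hx))]

-- membership in the key list of the Counter sum
lemma pv_mem_update_ofList (s1 s2 : List (List Char)) (x : List Char) :
    x ∈ PySem.Set.update (PySem.Set.ofList s1) s2 ↔ x ∈ s1 ∨ x ∈ s2 := by
  rw [PySem.Set.update_eq_append_filter]
  simp only [List.mem_append, List.mem_filter, PySem.Set.mem_ofList]
  constructor
  · rintro (h | ⟨h, _⟩)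
    · exact Or.inl h
    · exact Or.inr h
  · intro h
    by_cases h1 : x ∈ s1
    · exact Or.inl h1
    · rcases h with h | h
      · exact absurd h h1
      · refine Or.inr ⟨h, ?_⟩
        simp [PySem.Set.contains, PySem.Set.mem_ofList, h1]

-- proof-side name for A's double loop
def pvPairA (s1 s2 K : List (List Char)) : List (List Char) × List (List Char) :=
  K.foldl (fun acc k =>
    ((PySem.List.pyRange 0 (max ((PySem.Dict.counter s1).getD k 0) ((PySem.Dict.counter s2).getD k 0)) 1).foldl (fun a _ => a ++ [k]) acc.1,
     (PySem.List.pyRange 0 (min ((PySem.Dict.counter s1).getD k 0) ((PySem.Dict.counter s2).getD k 0)) 1).foldl (fun a _ => a ++ [k]) acc.2)) ([], [])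

lemma pv_core (s1 s2 K : List (List Char)) (hn : K.Nodup)
    (hm : ∀ x, x ∈ K ↔ x ∈ s1 ∨ x ∈ s2) :
    (if (pvPairA s1 s2 K).2 ≠ [] ∨ (pvPairA s1 s2 K).1 ≠ [] then
        PySem.Int.floordiv (((pvPairA s1 s2 K).2.length : Int) * 65536) ((pvPairA s1 s2 K).1.length : Int)
      else 65536)
    = (if ((s1.length : Int) + (s2.length : Int) - (pvInterB s1 s2)) ≠ 0 then
        PySem.Int.floordiv ((pvInterB s1 s2) * 65536)
          ((s1.length : Int) + (s2.length : Int) - (pvInterB s1 s2))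
      else 65536) := by
  have hIB0 : pvInterB s1 s2 = ((pvBagInter s1 s2).length : Int) := by
    rw [pvInterB, pv_loop_eq_bagInter]; omega
  rw [hIB0]
  have hp : pvPairA s1 s2 K = (K.foldl (fun (a : List (List Char)) (k : List Char) => (PySem.List.pyRange 0 (max ((PySem.Dict.counter s1).getD k 0) ((PySem.Dict.counter s2).getD k 0)) 1).foldl (fun a _ => a ++ [k]) a) [], K.foldl (fun (a : List (List Char)) (k : List Char) => (PySem.List.pyRange 0 (min ((PySem.Dict.counter s1).getD k 0) ((PySem.Dict.counter s2).getD k 0)) 1).foldl (fun a _ => a ++ [k]) a) []) := by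
    unfold pvPairA
    exact PySem.List.foldl_prod_mk (fun (a : List (List Char)) (k : List Char) => (PySem.List.pyRange 0 (max ((PySem.Dict.counter s1).getD k 0) ((PySem.Dict.counter s2).getD k 0)) 1).foldl (fun a _ => a ++ [k]) a) (fun (a : List (List Char)) (k : List Char) => (PySem.List.pyRange 0 (min ((PySem.Dict.counter s1).getD k 0) ((PySem.Dict.counter s2).getD k 0)) 1).foldl (fun a _ => a ++ [k]) a) K [] []
  have hlenU : (K.foldl (fun (a : List (List Char)) (k : List Char) => (PySem.List.pyRange 0 (max ((PySem.Dict.counter s1).getD k 0) ((PySem.Dict.counter s2).getD k 0)) 1).foldl (fun a _ => a ++ [k]) a) []).length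
      = (K.map (fun k => (max ((s1.count k : Int)) (s2.count k)).toNat)).sum := by
    simp [PySem.Dict.getD_counter, Function.comp_def, List.length_replicate]
  have hlenI : (K.foldl (fun (a : List (List Char)) (k : List Char) => (PySem.List.pyRange 0 (min ((PySem.Dict.counter s1).getD k 0) ((PySem.Dict.counter s2).getD k 0)) 1).foldl (fun a _ => a ++ [k]) a) []).length
      = (K.map (fun k => (min ((s1.count k : Int)) (s2.count k)).toNat)).sum := by
    simp [PySem.Dict.getD_counter, Function.comp_def, List.length_replicate]
  -- cast the two Nat sums to Int
  have hcastI : (((K.map (fun k => (min ((s1.count k : Int)) (s2.count k)).toNat)).sum : Nat) : Int)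
      = (K.map (fun k => min ((s1.count k : Int)) (s2.count k))).sum :=
    pv_sum_toNat_int _ K (fun k _ => le_min (Int.natCast_nonneg _) (Int.natCast_nonneg _))
  have hcastU : (((K.map (fun k => (max ((s1.count k : Int)) (s2.count k)).toNat)).sum : Nat) : Int)
      = (K.map (fun k => max ((s1.count k : Int)) (s2.count k))).sum :=
    pv_sum_toNat_int _ K (fun k _ => le_max_of_le_left (Int.natCast_nonneg _))
  -- identify B's inter with A's inter length, and B's union with A's union length
  have hIB : (((pvBagInter s1 s2).length : Nat) : Int)
      = (((K.map (fun k => (min ((s1.count k : Int)) (s2.count k)).toNat)).sum : Nat) : Int) := by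
    rw [hcastI, pv_bagInter_length s1 s2 K hn hm]
  have hUB : (s1.length : Int) + (s2.length : Int) - (((pvBagInter s1 s2).length : Nat) : Int)
      = (((K.map (fun k => (max ((s1.count k : Int)) (s2.count k)).toNat)).sum : Nat) : Int) := by
    rw [hIB, hcastI, hcastU, pv_sum_max_eq s1 s2 K hn hm]
  -- the intersection is no larger than the union
  have hle : (K.map (fun k => (min ((s1.count k : Int)) (s2.count k)).toNat)).sum
      ≤ (K.map (fun k => (max ((s1.count k : Int)) (s2.count k)).toNat)).sum := by
    apply List.sum_le_sum
    intro k _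
    exact Int.toNat_le_toNat (min_le_of_left_le (le_max_left _ _))
  by_cases h0 : (K.map (fun k => (max ((s1.count k : Int)) (s2.count k)).toNat)).sum = 0
  · have hi0 : (K.map (fun k => (min ((s1.count k : Int)) (s2.count k)).toNat)).sum = 0 := by omega
    rw [if_neg, if_neg]
    · rw [hUB, h0]; simp
    · rw [hp]
      simp only [ne_eq, not_or, not_not]
      constructor
      · exact List.eq_nil_of_length_eq_zero (by rw [hlenI, hi0])
      · exact List.eq_nil_of_length_eq_zero (by rw [hlenU, h0])
  · rw [if_pos, if_pos]
    · rw [hp]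
      simp only
      rw [hlenI, hlenU, hUB, hIB]
    · rw [hUB]
      exact_mod_cast h0
    · refine Or.inr ?_
      rw [hp]
      simp only
      intro hnil
      exact h0 (by rw [← hlenU, hnil]; rfl)

-- ===== VERDICT (by name: the statement is the Claim_ definition above) =====
theorem solution_spec : Claim_equal_solution := by
  intro str1 str2 _
  unfold Spec_solution solution solution_alt
  refine pv_core (pvBigrams str1.toList) (pvBigrams str2.toList) _ ?_ ?_
  · exact pv_nodup_keys_foldl_insert _ _
      (by rw [PySem.Dict.keys_counter]; exact PySem.Set.nodup_ofList _)
  · intro x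
    rw [pv_keys_foldl_insert, PySem.Dict.keys_counter, PySem.Dict.items_counter]
    rw [List.map_map]
    have hcomp : (Prod.fst ∘ fun k => (k, ((pvBigrams str2.toList).count k : Int))) = id := rfl
    rw [hcomp, List.map_id, pv_mem_update_ofList]
    simp [PySem.Set.mem_ofList]
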